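-- pv_equiv track=rewrite | github.com/nnlaaau/python-class | python-assignments/a4_300071088/a4_part1_300071088.py | max_anagram
-- ===== SOURCE A (Python) =====
-- def k_anagram(l, anagcount, k):
--     """(list of str, list of int, int) -> list of str
--
--     - l is a list of words (with no words duplicated)
--     - anagcount is a list of integers where i-th integer in the list
--     represents the number of anagrams in wordbook of the i-th word in l.
--
--     The function returns a  (lexicographicaly sorted) list of all the words
--     in l that have exactlly k anagrams (in wordbook as recorded in anagcount)
--     """
--     kanagram = []
--     for i in range(0, len(anagcount)):
--         if k == anagcount[i]:
--             kanagram.append(l[i])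
--     return kanagram
--
-- def max_anagram(l, anagcount):
--     """
--     (list of str, list of int) -> list of str
--     - l is a list of words (with no words duplicated)
--     - anagcount is a list of integers where i-th integer in the list
--     represents the number of anagrams in wordbook of the i-th word in l.
--
--     The function returns a (lexicographicaly sorted) list of all the words
--     in l with maximum number of anagrams (in wordbook as recorded in anagcount)
--     """
--     i = 0
--     big = anagcount[0]
--     while i <= len(anagcount) - 1:
--         if big >= anagcount[i]:
--             i += 1
--         else:
--             big = anagcount[i]
--             i += 1
--     maxed = k_anagram(l, anagcount, big)
--     return maxed
-- ===== SOURCE B (Python) =====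
-- def max_anagram(l, anagcount):
--     """Single pass: maintain the running maximum and the running list of
--     words achieving it, instead of a find-max pass followed by a filter pass."""
--     best = anagcount[0]
--     result = []
--     for i in range(len(anagcount)):
--         c = anagcount[i]
--         if c > best:
--             best = c
--             result = [l[i]]
--         elif c == best:
--             result.append(l[i])
--     return result
-- ===== Notes on version B (the rewrite author's own statement) =====
-- stated objective: simpler
-- what changed: B replaces A's two-phase scheme (a while loop finding the maximum, then a separate k_anagram filtering pass) with one traversal that maintains the running maximum together with the running list of words achieving it, resetting the list on a new maximum; one pass instead of two.
import Mathlib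
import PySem

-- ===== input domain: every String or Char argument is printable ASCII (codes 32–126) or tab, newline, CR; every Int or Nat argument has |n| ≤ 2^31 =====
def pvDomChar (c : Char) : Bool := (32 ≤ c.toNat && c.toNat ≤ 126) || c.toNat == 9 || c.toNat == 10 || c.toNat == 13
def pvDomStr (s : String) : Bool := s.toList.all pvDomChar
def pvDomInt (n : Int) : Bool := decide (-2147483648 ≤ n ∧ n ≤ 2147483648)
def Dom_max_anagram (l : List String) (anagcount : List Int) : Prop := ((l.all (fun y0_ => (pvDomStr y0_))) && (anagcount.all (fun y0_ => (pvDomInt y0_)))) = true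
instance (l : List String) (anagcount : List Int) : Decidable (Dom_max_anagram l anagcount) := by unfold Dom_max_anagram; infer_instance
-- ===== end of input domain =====

-- B: one traversal maintaining the running maximum and the running answer list,
-- instead of A's max-finding while loop followed by a k_anagram filtering pass.


-- ===== PORT A =====
-- l[i] / anagcount[i] only occur at nonnegative indices that are in range on
-- every input admitted by Pre_, so getD is exact there.
def k_anagram (l : List String) (anagcount : List Int) (k : Int) : List String :=
  (List.range anagcount.length).foldl
    (fun kanagram i =>
      if k = anagcount.getD i 0 then kanagram ++ [l.getD i ""] else kanagram) []

def max_anagram (l : List String) (anagcount : List Int) : List String :=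
  let big := (List.range anagcount.length).foldl
    (fun big i => if big ≥ anagcount.getD i 0 then big else anagcount.getD i 0)
    (anagcount.getD 0 0)
  k_anagram l anagcount big

-- ===== PORT B =====
def max_anagram_alt (l : List String) (anagcount : List Int) : List String :=
  match anagcount with
  | [] => []   -- Python B raises IndexError here (outside Pre_)
  | a0 :: rest =>
    ((List.range (a0 :: rest : List Int).length).foldl
      (fun (st : Int × List String) i =>
        let c := (a0 :: rest : List Int).getD i 0
        if st.1 < c then (c, [l.getD i ""])
        else if c = st.1 then (st.1, st.2 ++ [l.getD i ""])
        else st)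
      (a0, [])).2

-- ===== PRECONDITION & SPEC =====
-- Pre_ excludes exactly the inputs where Python A raises IndexError: empty
-- anagcount, or some maximal position of anagcount with no matching word in l.
def Pre_max_anagram (l : List String) (anagcount : List Int) : Prop :=
  anagcount ≠ [] ∧
    ∀ i < anagcount.length,
      (∀ j < anagcount.length, anagcount.getD j 0 ≤ anagcount.getD i 0) →
      i < l.length
instance (l : List String) (anagcount : List Int) : Decidable (Pre_max_anagram l anagcount) := by
  unfold Pre_max_anagram; infer_instance

def pvWitness_max_anagram : List String × List Int := (["ab", "ba", "cd"], [2, 2, 1])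

def Spec_max_anagram (l : List String) (anagcount : List Int) (out : List String) : Prop := out = max_anagram_alt l anagcount
instance (l : List String) (anagcount : List Int) (out : List String) : Decidable (Spec_max_anagram l anagcount out) := by unfold Spec_max_anagram; infer_instance

-- ===== CLAIM (what is proved, stated in full; the proofs are below) =====
def Claim_equal_max_anagram : Prop := ∀ (l : List String) (anagcount : List Int), Dom_max_anagram l anagcount → Pre_max_anagram l anagcount → Spec_max_anagram l anagcount (max_anagram l anagcount)

-- ===== LEMMAS AND PROOFS =====

-- running maximum of the first n counts, seeded with anagcount[0] (A's while loop)
def maxPre (anagcount : List Int) (n : Nat) : Int :=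
  (List.range n).foldl
    (fun big i => if big ≥ anagcount.getD i 0 then big else anagcount.getD i 0)
    (anagcount.getD 0 0)

-- k_anagram's filter restricted to the first n indices
def kfil (l : List String) (anagcount : List Int) (k : Int) (n : Nat) : List String :=
  (List.range n).foldl
    (fun kanagram i =>
      if k = anagcount.getD i 0 then kanagram ++ [l.getD i ""] else kanagram) []

theorem maxPre_succ (anagcount : List Int) (n : Nat) :
    maxPre anagcount (n + 1) =
      if maxPre anagcount n ≥ anagcount.getD n 0 then maxPre anagcount n
      else anagcount.getD n 0 := by
  unfold maxPre
  rw [List.range_succ, List.foldl_append]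
  rfl

theorem kfil_succ (l : List String) (anagcount : List Int) (k : Int) (n : Nat) :
    kfil l anagcount k (n + 1) =
      if k = anagcount.getD n 0 then kfil l anagcount k n ++ [l.getD n ""]
      else kfil l anagcount k n := by
  unfold kfil
  rw [List.range_succ, List.foldl_append]
  rfl

theorem maxPre_ge (anagcount : List Int) (n i : Nat) (h : i < n) :
    anagcount.getD i 0 ≤ maxPre anagcount n := by
  induction n with
  | zero => omega
  | succ m ih =>
    rw [maxPre_succ]
    rcases Nat.lt_or_ge i m with hm | hm
    · have := ih hm
      split <;> omega
    · have : i = m := by omega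
      subst this
      split <;> omega

theorem kfil_nil (l : List String) (anagcount : List Int) (k : Int) (n : Nat)
    (h : ∀ i < n, k ≠ anagcount.getD i 0) : kfil l anagcount k n = [] := by
  induction n with
  | zero => rfl
  | succ m ih =>
    rw [kfil_succ, if_neg (h m (by omega))]
    exact ih (fun i hi => h i (by omega))

theorem alt_invariant (l : List String) (anagcount : List Int) (n : Nat) :
    (List.range n).foldl
      (fun (st : Int × List String) i =>
        let c := anagcount.getD i 0
        if st.1 < c then (c, [l.getD i ""])
        else if c = st.1 then (st.1, st.2 ++ [l.getD i ""])
        else st)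
      (anagcount.getD 0 0, []) =
    (maxPre anagcount n, kfil l anagcount (maxPre anagcount n) n) := by
  induction n with
  | zero => simp [maxPre, kfil]
  | succ m ih =>
    rw [List.range_succ, List.foldl_append, ih]
    simp only [List.foldl_cons, List.foldl_nil]
    set b := maxPre anagcount m with hb
    set c := anagcount.getD m 0 with hc
    by_cases h1 : b < c
    · have hmax : maxPre anagcount (m + 1) = c := by
        rw [maxPre_succ, ← hb, ← hc]; split <;> omega
      have hzero : kfil l anagcount c m = [] := by
        apply kfil_nil
        intro i hi
        have := maxPre_ge anagcount m i hi
        rw [← hb] at this; omega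
      rw [if_pos h1, hmax, kfil_succ, ← hc, if_pos rfl, hzero, List.nil_append]
    · have hmax : maxPre anagcount (m + 1) = b := by
        rw [maxPre_succ, ← hb, ← hc]; split <;> omega
      rw [if_neg h1, hmax, kfil_succ, ← hc]
      by_cases h2 : c = b
      · rw [if_pos h2, if_pos h2.symm]
      · rw [if_neg h2, if_neg (fun h => h2 h.symm)]

-- ===== VERDICT (by name: the statement is the Claim_ definition above) =====
theorem max_anagram_spec : Claim_equal_max_anagram := by
  intro l anagcount _ _
  unfold Spec_max_anagram
  cases anagcount with
  | nil => rfl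
  | cons a0 rest =>
    have h0 : ((a0 :: rest : List Int).getD 0 0) = a0 := rfl
    have hinv := alt_invariant l (a0 :: rest) (a0 :: rest).length
    rw [h0] at hinv
    simp only [max_anagram_alt]
    rw [hinv]
    rfl
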